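-- pv_equiv track=rewrite | github.com/ReadyDynamic/ReadyDynamic | fix_label_file_gen/fix_file_gen.py | replace_nth_placeholder
-- ===== SOURCE A (Python) =====
-- def replace_nth_placeholder(template: str, token: str, n: int) -> str:
--     count = 0
--     result = []
--     i = 0
--     while i < len(template):
--         if template.startswith("<*>", i):
--             count += 1
--             if count == n:
--                 result.append(token)
--             else:
--                 result.append("<*>")
--             i += 3
--         else:
--             result.append(template[i])
--             i += 1
--     return "".join(result)
-- ===== SOURCE B (Python) =====
-- def replace_nth_placeholder(template: str, token: str, n: int) -> str:
--     parts = []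
--     rest = template
--     count = 0
--     while True:
--         pos = rest.find("<*>")
--         if pos == -1:
--             return "".join(parts) + rest
--         count += 1
--         if count == n:
--             return "".join(parts) + rest[:pos] + token + rest[pos + 3:]
--         parts.append(rest[:pos + 3])
--         rest = rest[pos + 3:]
-- ===== Notes on version B (the rewrite author's own statement) =====
-- stated objective: faster
-- what changed: Replaces the character-by-character scan with repeated str.find over placeholder positions, splicing whole chunks between occurrences instead of appending single characters.
import Mathlib
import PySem

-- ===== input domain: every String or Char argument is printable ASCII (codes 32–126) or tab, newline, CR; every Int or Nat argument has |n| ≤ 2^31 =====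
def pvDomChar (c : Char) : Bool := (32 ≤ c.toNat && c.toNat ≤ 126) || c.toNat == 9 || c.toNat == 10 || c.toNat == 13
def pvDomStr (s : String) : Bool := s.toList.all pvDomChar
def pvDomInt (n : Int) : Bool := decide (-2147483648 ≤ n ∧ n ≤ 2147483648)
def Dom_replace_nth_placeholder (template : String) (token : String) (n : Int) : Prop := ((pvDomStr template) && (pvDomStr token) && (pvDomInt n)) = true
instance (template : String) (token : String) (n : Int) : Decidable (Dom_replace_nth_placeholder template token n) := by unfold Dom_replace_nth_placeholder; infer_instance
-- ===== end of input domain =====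

-- B replaces A's character-by-character scan with a find-and-splice loop over whole
-- chunks between '<*>' occurrences (objective: constant-factor speedup in Python).

-- the literal "<*>"
def pvPH : List Char := ['<', '*', '>']

-- ===== PORT A =====
-- A's while-loop over index i, as structural recursion over the remaining characters;
-- 'template.startswith("<*>", i)' is the head-pattern match on the remainder (exact).
def goA (tok : List Char) (n : Int) : Int → List Char → List Char
  | _, [] => []
  | count, '<' :: '*' :: '>' :: rest =>
      (if count + 1 = n then tok else pvPH) ++ goA tok n (count + 1) rest
  | count, c :: rest => c :: goA tok n count rest

def replace_nth_placeholder (template : String) (token : String) (n : Int) : String :=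
  String.mk (goA token.toList n 0 template.toList)

-- ===== PORT B =====
-- exact port of "pos = rest.find('<*>')" together with the slices rest[:pos],
-- rest[:pos+3] and rest[pos+3:]: first-occurrence split (none = find returned -1,
-- some (p, s) = chunk before the occurrence and remainder after it).
def findSplit : List Char → Option (List Char × List Char)
  | '<' :: '*' :: '>' :: rest => some ([], rest)
  | c :: rest => (findSplit rest).map (fun ps => (c :: ps.1, ps.2))
  | [] => none

-- termination of B's loop: the remainder shrinks at each iteration
theorem findSplit_length : ∀ {cs p s : List Char}, findSplit cs = some (p, s) → s.length < cs.length := by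
  intro cs
  fun_induction findSplit cs with
  | case1 rest => intro p s h; simp at h; simp [h.2]; omega
  | case2 c rest hne ih =>
      intro p s h
      simp only [Option.map_eq_some_iff] at h
      obtain ⟨⟨p', s'⟩, hfs, heq⟩ := h
      have := ih hfs
      simp at heq
      simp [← heq.2]
      omega
  | case3 => intro p s h; simp at h

-- B's while-loop: parts is the accumulated output, rest the unscanned remainder.
def goB (tok : List Char) (n : Int) (parts : List Char) (count : Int) (rest : List Char) :
    List Char :=
  match h : findSplit rest with
  | none => parts ++ rest
  | some (p, s) =>
    if count + 1 = n then parts ++ p ++ tok ++ s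
    else goB tok n (parts ++ p ++ pvPH) (count + 1) s
termination_by rest.length
decreasing_by exact findSplit_length h

def replace_nth_placeholder_alt (template : String) (token : String) (n : Int) : String :=
  String.mk (goB token.toList n [] 0 template.toList)

-- ===== PRECONDITION & SPEC =====
def Spec_replace_nth_placeholder (template : String) (token : String) (n : Int) (out : String) : Prop := out = replace_nth_placeholder_alt template token n
instance (template : String) (token : String) (n : Int) (out : String) : Decidable (Spec_replace_nth_placeholder template token n out) := by unfold Spec_replace_nth_placeholder; infer_instance

-- ===== CLAIM (what is proved, stated in full; the proofs are below) =====
def Claim_equal_replace_nth_placeholder : Prop := ∀ (template : String) (token : String) (n : Int), Dom_replace_nth_placeholder template token n → Spec_replace_nth_placeholder template token n (replace_nth_placeholder template token n)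

-- ===== LEMMAS AND PROOFS =====

-- no occurrence left: A's scan copies the remainder verbatim
theorem goA_none (tok : List Char) (n : Int) :
    ∀ cs : List Char, findSplit cs = none → ∀ count, goA tok n count cs = cs := by
  intro cs
  fun_induction findSplit cs with
  | case1 rest => intro h; simp at h
  | case2 c rest hne ih =>
      intro h count
      simp only [Option.map_eq_none_iff] at h
      rw [goA.eq_3 _ _ _ _ _ hne, ih h count]
  | case3 => intro _ _; simp [goA]

-- across the first occurrence, A's scan copies the chunk, handles the occurrence,
-- and continues with the incremented counter
theorem goA_splice (tok : List Char) (n : Int) :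
    ∀ cs p s : List Char, findSplit cs = some (p, s) → ∀ count,
      goA tok n count cs = p ++ (if count + 1 = n then tok else pvPH) ++ goA tok n (count + 1) s := by
  intro cs
  fun_induction findSplit cs with
  | case1 rest =>
      intro p s h count
      simp at h
      obtain ⟨hp, hs⟩ := h
      subst hp; subst hs
      simp [goA]
  | case2 c rest hne ih =>
      intro p s h count
      simp only [Option.map_eq_some_iff] at h
      obtain ⟨⟨p', s'⟩, hfs, heq⟩ := h
      simp at heq
      obtain ⟨hp, hs⟩ := heq
      subst hp; subst hs
      rw [goA.eq_3 _ _ _ _ _ hne, ih p' s' hfs count]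
      simp
  | case3 => intro p s h; simp at h

-- once count has reached n, A's scan is the identity
theorem goA_id (tok : List Char) (n : Int) :
    ∀ (count : Int) (cs : List Char), n ≤ count → goA tok n count cs = cs := by
  intro count cs
  fun_induction goA tok n count cs with
  | case1 => intro _; rfl
  | case2 count rest ih =>
      intro hn
      have hne : ¬ (count + 1 = n) := by omega
      simp only [if_neg hne]
      rw [ih (by omega)]
      simp [pvPH]
  | case3 count c rest hne ih =>
      intro hn
      rw [ih hn]

-- loop invariant: B's accumulator plus A's scan of the remainder is the answer
theorem goB_eq (tok : List Char) (n : Int) :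
    ∀ (parts : List Char) (count : Int) (rest : List Char),
      goB tok n parts count rest = parts ++ goA tok n count rest := by
  intro parts count rest
  fun_induction goB tok n parts count rest with
  | case1 parts count rest h =>
      rw [goA_none tok n rest h count]
  | case2 parts count rest p s h hif =>
      rw [goA_splice tok n rest p s h count, if_pos hif,
        goA_id tok n (count + 1) s (by omega)]
      simp
  | case3 parts count rest p s h hif ih =>
      rw [ih, goA_splice tok n rest p s h count, if_neg hif]
      simp

-- ===== VERDICT (by name: the statement is the Claim_ definition above) =====
theorem replace_nth_placeholder_spec : Claim_equal_replace_nth_placeholder := by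
  intro template token n _
  unfold Spec_replace_nth_placeholder replace_nth_placeholder replace_nth_placeholder_alt
  rw [goB_eq]
  simp
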